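-- pv_equiv track=rewrite | github.com/mrmthornton/Data_Structures_and_Algorithms | Algorithmic_Toolbox/greedy_algorithms_starter_files/largest_number.py | check_all_permutations
-- ===== SOURCE A (Python) =====
-- def check_all_permutations(collected):
--     if len(collected)>1:
--         results = []
--         L = len(collected)
--         for i in range(L):
--             n=collected[i]
--             local_collected = [collected[j] for j in range(L) if j != i]
--             local_result = [n+s for s in check_all_permutations(local_collected)]
--             [results.append(s) for s in local_result]
--         return(results)
--     else:
--         return(collected)
-- ===== SOURCE B (Python) =====
-- def check_all_permutations(collected):
--     # Iterative breadth-first expansion with an explicit worklist of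
--     # (accumulated-concatenation, remaining-elements) states, instead of recursion.
--     if len(collected) <= 1:
--         return collected
--     states = [(collected[i], collected[:i] + collected[i + 1:])
--               for i in range(len(collected))]
--     for _ in range(len(collected) - 1):
--         states = [(acc + rem[j], rem[:j] + rem[j + 1:])
--                   for acc, rem in states
--                   for j in range(len(rem))]
--     return [acc for acc, _ in states]
-- ===== Notes on version B (the rewrite author's own statement) =====
-- stated objective: alternative
-- what changed: Replaces A's per-element recursion (pick index i, recurse on the list with i removed, prefix-map, extend) by an iterative breadth-first worklist of (accumulated concatenation, remaining elements) states expanded level by level with no recursion.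
import Mathlib
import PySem

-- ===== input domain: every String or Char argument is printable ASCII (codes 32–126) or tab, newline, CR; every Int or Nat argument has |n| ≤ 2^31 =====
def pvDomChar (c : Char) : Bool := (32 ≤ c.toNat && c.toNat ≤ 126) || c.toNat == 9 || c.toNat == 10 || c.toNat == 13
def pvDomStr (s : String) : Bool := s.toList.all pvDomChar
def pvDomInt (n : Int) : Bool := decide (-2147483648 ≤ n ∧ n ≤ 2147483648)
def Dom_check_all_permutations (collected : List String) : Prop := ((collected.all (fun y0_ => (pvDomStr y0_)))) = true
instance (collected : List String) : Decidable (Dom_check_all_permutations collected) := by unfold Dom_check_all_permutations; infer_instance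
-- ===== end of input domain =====

-- B replaces A's bespoke recursion by an iterative breadth-first worklist of
-- (accumulated concatenation, remaining elements) states; objective: alternative decomposition.


-- ===== PORT A =====
-- `collected[i]` / `collected[j]` are ported as `List.getD _ _ ""`: exact, since the
-- indices come from `range collected.length` (never negative, never out of range).
-- `[results.append(s) for s in local_result]` extends `results` by `local_result`.
-- The loop runs over `(List.range _).attach` (same values; the membership proof is
-- used only for termination of the recursion).
def check_all_permutations (collected : List String) : List String :=
  if _h : collected.length > 1 then
    -- results ++ local_result, with n / local_collected / local_result inlined
    (List.range collected.length).attach.foldl (fun results i =>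
      results ++
        (check_all_permutations
            (((List.range collected.length).filter (fun j => j ≠ i.1)).map
              (fun j => collected.getD j ""))).map
          (fun s => collected.getD i.1 "" ++ s)) []
  else collected
termination_by collected.length
decreasing_by
  simp only [List.length_map]
  exact List.length_filter_lt_length_iff_exists.mpr
    ⟨i.1, i.2, by simp⟩ |>.trans_eq (List.length_range)

-- ===== PORT B =====
-- `rem[j]` is ported as `List.getD rem j ""`: exact, since `j` comes from
-- `range rem.length`.  Slices are ported with `PySem.List.slice`.
def altStep (states : List (String × List String)) : List (String × List String) :=
  states.flatMap (fun p =>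
    (List.range p.2.length).map (fun (j : Nat) =>
      (p.1 ++ p.2.getD j "",
       PySem.List.slice p.2 none (some (j : Int)) ++
       PySem.List.slice p.2 (some ((j : Int) + 1)) none)))

-- port of B's `for _ in range(len(collected) - 1): states = [...]`
def altLoop : Nat → List (String × List String) → List (String × List String)
  | 0, states => states
  | k + 1, states => altLoop k (altStep states)

def check_all_permutations_alt (collected : List String) : List String :=
  if collected.length ≤ 1 then collected
  else
    let init := (List.range collected.length).map (fun (i : Nat) =>
      (collected.getD i "",
       PySem.List.slice collected none (some (i : Int)) ++
       PySem.List.slice collected (some ((i : Int) + 1)) none))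
    (altLoop (collected.length - 1) init).map Prod.fst

-- ===== PRECONDITION & SPEC =====
def Spec_check_all_permutations (collected : List String) (out : List String) : Prop := out = check_all_permutations_alt collected
instance (collected : List String) (out : List String) : Decidable (Spec_check_all_permutations collected out) := by unfold Spec_check_all_permutations; infer_instance

-- ===== CLAIM (what is proved, stated in full; the proofs are below) =====
def Claim_equal_check_all_permutations : Prop := ∀ (collected : List String), Dom_check_all_permutations collected → Spec_check_all_permutations collected (check_all_permutations collected)

-- ===== LEMMAS AND PROOFS =====

-- structural "choose one element, keep the rest in order" selector
def pickEach : List String → List (String × List String)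
  | [] => []
  | x :: xs => (x, xs) :: (pickEach xs).map (fun p => (p.1, x :: p.2))

lemma flatMap_congr {α β : Type} {l : List α} {f g : α → List β}
    (h : ∀ a ∈ l, f a = g a) : l.flatMap f = l.flatMap g := by
  induction l with
  | nil => rfl
  | cons x xs ih =>
    simp only [List.flatMap_cons, h x (by simp), ih (fun a ha => h a (by simp [ha]))]

lemma map_getD_range (xs : List String) :
    (List.range xs.length).map (fun j => xs.getD j "") = xs := by
  apply List.ext_getElem
  · simp
  · intro i h1 h2
    simp [List.getD_eq_getElem?_getD, List.getElem?_eq_getElem h2]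

lemma map_getD_range' (xs : List String) :
    (List.range xs.length).map (fun j => xs[j]?.getD "") = xs := by
  have := map_getD_range xs
  simpa [List.getD_eq_getElem?_getD] using this

lemma sel_eq_pickEach (xs : List String) :
    (List.range xs.length).map
      (fun i => (xs.getD i "", xs.take i ++ xs.drop (i + 1))) = pickEach xs := by
  induction xs with
  | nil => simp [pickEach]
  | cons x xs ih =>
    simp [List.range_succ_eq_map, List.map_map, Function.comp_def, pickEach, ← ih]

lemma filter_map_eq_erase (xs : List String) (i : Nat) (h : i < xs.length) :
    ((List.range xs.length).filter (fun j => j ≠ i)).map (fun j => xs.getD j "") =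
      xs.take i ++ xs.drop (i + 1) := by
  induction xs generalizing i with
  | nil => simp at h
  | cons x xs ih =>
    cases i with
    | zero =>
      simp [List.range_succ_eq_map, List.filter_map, Function.comp_def,
        List.map_map, map_getD_range']
    | succ k =>
      have hk : k < xs.length := by simpa using h
      simp only [List.length_cons, List.range_succ_eq_map, List.filter_cons,
        List.filter_map, Function.comp_def]
      simpa using ih k hk

lemma pickEach_snd_length (xs : List String) :
    ∀ p ∈ pickEach xs, p.2.length + 1 = xs.length := by
  induction xs with
  | nil => simp [pickEach]
  | cons x xs ih =>
    intro p hp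
    simp only [pickEach, List.mem_cons, List.mem_map] at hp
    rcases hp with rfl | ⟨q, hq, rfl⟩
    · simp
    · simpa using ih q hq

lemma A_eq (xs : List String) (h : 1 < xs.length) :
    check_all_permutations xs =
      (pickEach xs).flatMap
        (fun p => (check_all_permutations p.2).map (fun s => p.1 ++ s)) := by
  conv_lhs => rw [check_all_permutations]
  rw [dif_pos h]
  have hfold := @List.foldl_attach _ _ (List.range xs.length)
    (fun results i => results ++
      (check_all_permutations
          (((List.range xs.length).filter (fun j => j ≠ i)).map
            (fun j => xs.getD j ""))).map
        (fun s => xs.getD i "" ++ s)) []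
  rw [hfold, PySem.List.foldl_append_eq_flatMap,
    List.nil_append, ← sel_eq_pickEach, List.flatMap_map]
  refine flatMap_congr (fun i hi => ?_)
  have hi' : i < xs.length := List.mem_range.mp hi
  rw [filter_map_eq_erase xs i hi']

lemma altStep_eq (states : List (String × List String)) :
    altStep states =
      states.flatMap (fun p => (pickEach p.2).map (fun q => (p.1 ++ q.1, q.2))) := by
  refine flatMap_congr (fun p _ => ?_)
  rw [← sel_eq_pickEach, List.map_map]
  refine List.map_congr_left (fun j hj => ?_)
  have hc : ((j : Int) + 1) = ((j + 1 : Nat) : Int) := by push_cast; ring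
  rw [PySem.List.slice_to_natCast, hc, PySem.List.slice_from_natCast]
  rfl

lemma altLoop_spec : ∀ (k : Nat) (states : List (String × List String)),
    (∀ p ∈ states, p.2.length = k + 1) →
    (altLoop (k + 1) states).map Prod.fst =
      states.flatMap
        (fun p => (check_all_permutations p.2).map (fun s => p.1 ++ s)) := by
  intro k
  induction k with
  | zero =>
    intro states h
    show (altStep states).map Prod.fst = _
    rw [altStep_eq, List.map_flatMap]
    refine flatMap_congr (fun p hp => ?_)
    obtain ⟨y, hy⟩ := List.length_eq_one_iff.mp (h p hp)
    rw [hy, check_all_permutations]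
    simp [pickEach]
  | succ k ih =>
    intro states h
    show (altLoop (k + 1) (altStep states)).map Prod.fst = _
    rw [ih (altStep states) (by
      intro q hq
      rw [altStep_eq] at hq
      simp only [List.mem_flatMap, List.mem_map] at hq
      obtain ⟨p, hp, r, hr, rfl⟩ := hq
      have h1 := pickEach_snd_length p.2 r hr
      have h2 := h p hp
      show r.2.length = k + 1
      omega)]
    rw [altStep_eq, List.flatMap_assoc]
    refine flatMap_congr (fun p hp => ?_)
    rw [List.flatMap_map,
      A_eq p.2 (by have := h p hp; omega), List.map_flatMap]
    refine flatMap_congr (fun r _ => ?_)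
    simp [List.map_map, Function.comp_def, String.append_assoc]

-- ===== VERDICT (by name: the statement is the Claim_ definition above) =====
theorem check_all_permutations_spec : Claim_equal_check_all_permutations := by
  intro collected _dom
  unfold Spec_check_all_permutations check_all_permutations_alt
  by_cases hle : collected.length ≤ 1
  · rw [if_pos hle, check_all_permutations, dif_neg (by omega)]
  · rw [if_neg hle]
    have h2 : 2 ≤ collected.length := by omega
    have hinit : (List.range collected.length).map (fun (i : Nat) =>
        (collected.getD i "",
         PySem.List.slice collected none (some (i : Int)) ++
         PySem.List.slice collected (some ((i : Int) + 1)) none)) = pickEach collected := by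
      rw [← sel_eq_pickEach]
      refine List.map_congr_left (fun i hi => ?_)
      have hc : ((i : Int) + 1) = ((i + 1 : Nat) : Int) := by push_cast; ring
      rw [PySem.List.slice_to_natCast, hc, PySem.List.slice_from_natCast]
    simp only [hinit]
    have hk : collected.length - 1 = (collected.length - 2) + 1 := by omega
    rw [hk, altLoop_spec (collected.length - 2) (pickEach collected) (by
      intro p hp
      have := pickEach_snd_length collected p hp
      omega)]
    exact A_eq collected (by omega)
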